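-- pv_equiv track=rewrite | github.com/ronschneider/sand | lights/spi_test.py | ws281x_encode
-- ===== SOURCE A (Python) =====
-- def ws281x_encode(pixel):
--     """Encode RGB pixel for WS281x SPI transmission."""
--     r, g, b = pixel
--     encoded = []
--     for value in (g, r, b):  # GRB order for WS281x
--         for i in range(7, -1, -1):
--             bit = (value >> i) & 1
--             # WS281x uses 3 SPI bits per LED bit (0: 100, 1: 110)
--             encoded.extend([0x6 if bit else 0x4])
--     return encoded
-- ===== SOURCE B (Python) =====
-- # Table-driven re-implementation: the 8 SPI codes for each byte value are
-- # precomputed once; encoding is three table reads concatenated (GRB order).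
-- _LOOKUP = [[0x6 if (byte >> i) & 1 else 0x4 for i in range(7, -1, -1)]
--            for byte in range(256)]
--
--
-- def ws281x_encode(pixel):
--     """Encode RGB pixel for WS281x SPI transmission."""
--     r, g, b = pixel
--     return _LOOKUP[g & 0xFF] + _LOOKUP[r & 0xFF] + _LOOKUP[b & 0xFF]
-- ===== Notes on version B (the rewrite author's own statement) =====
-- stated objective: simpler
-- what changed: Replaced the nested per-bit shift/mask loop with a 256-entry table (built once at module load) mapping each byte to its eight 3-bit SPI codes; the function becomes three masked table reads concatenated in GRB order.
import Mathlib
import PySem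

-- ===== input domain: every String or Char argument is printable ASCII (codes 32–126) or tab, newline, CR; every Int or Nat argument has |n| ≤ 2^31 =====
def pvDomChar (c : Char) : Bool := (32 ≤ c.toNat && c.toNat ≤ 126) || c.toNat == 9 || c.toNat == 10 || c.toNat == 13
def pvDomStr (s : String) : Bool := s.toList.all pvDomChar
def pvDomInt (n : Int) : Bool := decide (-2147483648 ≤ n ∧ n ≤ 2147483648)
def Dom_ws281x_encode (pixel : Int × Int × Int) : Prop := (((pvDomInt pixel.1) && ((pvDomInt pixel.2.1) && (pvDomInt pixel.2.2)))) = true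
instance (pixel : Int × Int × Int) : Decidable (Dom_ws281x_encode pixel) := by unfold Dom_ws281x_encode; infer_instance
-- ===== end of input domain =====

-- B replaces A's per-bit shift/mask inner loop with a precomputed 256-entry code
-- table indexed by each masked colour byte (objective: simpler call site; return
-- value proved equal on all inputs in the domain).


-- ===== PORT A =====
-- literal port: for value in (g, r, b): for i in range(7,-1,-1):
--   bit = (value >> i) & 1; encoded.extend([0x6 if bit else 0x4])
-- 'value >> i' is Int.shiftRight value i.toNat (i comes from pyRange, always ≥ 0 here)
def ws281x_encode (pixel : Int × Int × Int) : List Int :=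
  let r := pixel.1
  let g := pixel.2.1
  let b := pixel.2.2
  [g, r, b].foldl (fun encoded value =>
    (PySem.List.pyRange 7 (-1) (-1)).foldl (fun enc i =>
      let bit := PySem.Int.band (Int.shiftRight value i.toNat) 1
      enc ++ [if bit ≠ 0 then 0x6 else 0x4]) encoded) []

-- ===== PORT B =====
-- _LOOKUP[byte] = [0x6 if (byte >> i) & 1 else 0x4 for i in range(7,-1,-1)]
def pvLookupByte (byte : Nat) : List Int :=
  (PySem.List.pyRange 7 (-1) (-1)).map (fun i =>
    if PySem.Int.band (Int.shiftRight (byte : Int) i.toNat) 1 ≠ 0 then 0x6 else 0x4)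

def pvLOOKUP : List (List Int) := (List.range 256).map pvLookupByte

-- _LOOKUP[v & 0xFF]: the index is provably in [0, 256), so getD is the exact list read
def ws281x_encode_alt (pixel : Int × Int × Int) : List Int :=
  let r := pixel.1
  let g := pixel.2.1
  let b := pixel.2.2
  pvLOOKUP.getD (PySem.Int.band g 255).toNat []
    ++ pvLOOKUP.getD (PySem.Int.band r 255).toNat []
    ++ pvLOOKUP.getD (PySem.Int.band b 255).toNat []

-- ===== PRECONDITION & SPEC =====
def Spec_ws281x_encode (pixel : Int × Int × Int) (out : List Int) : Prop := out = ws281x_encode_alt pixel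
instance (pixel : Int × Int × Int) (out : List Int) : Decidable (Spec_ws281x_encode pixel out) := by unfold Spec_ws281x_encode; infer_instance

-- ===== CLAIM (what is proved, stated in full; the proofs are below) =====
def Claim_equal_ws281x_encode : Prop := ∀ (pixel : Int × Int × Int), Dom_ws281x_encode pixel → Spec_ws281x_encode pixel (ws281x_encode pixel)

-- ===== LEMMAS AND PROOFS =====

theorem pvRange78 : PySem.List.pyRange 7 (-1) (-1) = [7, 6, 5, 4, 3, 2, 1, 0] := by decide

-- low 8 bits: bit i of v equals bit i of v & 255, for i < 8
theorem pv_bit_band (v : Int) (i : Nat) (h : i < 8) :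
    PySem.Int.band (Int.shiftRight v i) 1 = PySem.Int.band (Int.shiftRight (PySem.Int.band v 255) i) 1 := by
  cases v with
  | ofNat m =>
      have h255 : PySem.Int.band (Int.ofNat m) 255 = Int.ofNat (m &&& 255) := by
        simpa using PySem.Int.band_natCast m 255
      rw [h255]
      show PySem.Int.band (Int.ofNat (m >>> i)) 1 = PySem.Int.band (Int.ofNat ((m &&& 255) >>> i)) 1
      have e1 : PySem.Int.band (Int.ofNat (m >>> i)) 1 = Int.ofNat ((m >>> i) &&& 1) := by
        simpa using PySem.Int.band_natCast (m >>> i) 1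
      have e2 : PySem.Int.band (Int.ofNat ((m &&& 255) >>> i)) 1 = Int.ofNat (((m &&& 255) >>> i) &&& 1) := by
        simpa using PySem.Int.band_natCast ((m &&& 255) >>> i) 1
      rw [e1, e2]
      congr 1
      have : m &&& 255 = m % 256 := Nat.and_two_pow_sub_one_eq_mod m 8
      rw [this, Nat.and_one_is_mod, Nat.and_one_is_mod, Nat.shiftRight_eq_div_pow,
        Nat.shiftRight_eq_div_pow]
      interval_cases i <;> omega
  | negSucc m =>
      have hneg : ∀ x : Nat, ¬ (0 : Int) ≤ Int.negSucc x := fun x => by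
        simp [Int.negSucc_eq]; omega
      have hband : ∀ x : Nat, PySem.Int.band (Int.negSucc x) 255 = Int.ofNat (255 - (255 &&& x)) := by
        intro x
        unfold PySem.Int.band
        rw [if_neg (hneg x), if_pos (by decide)]
        norm_num [Int.negSucc_eq]; norm_num [Int.toNat]
      have hband1 : ∀ x : Nat, PySem.Int.band (Int.negSucc x) 1 = Int.ofNat (1 - (1 &&& x)) := by
        intro x
        unfold PySem.Int.band
        rw [if_neg (hneg x), if_pos (by decide)]
        norm_num [Int.negSucc_eq]
      show PySem.Int.band (Int.negSucc (m >>> i)) 1 = _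
      rw [hband1, hband m]
      show _ = PySem.Int.band (Int.ofNat ((255 - (255 &&& m)) >>> i)) 1
      have e2 : PySem.Int.band (Int.ofNat ((255 - (255 &&& m)) >>> i)) 1
          = Int.ofNat (((255 - (255 &&& m)) >>> i) &&& 1) := by
        simpa using PySem.Int.band_natCast ((255 - (255 &&& m)) >>> i) 1
      rw [e2]
      congr 1
      have h1 : 255 &&& m = m % 256 := by rw [Nat.and_comm]; exact Nat.and_two_pow_sub_one_eq_mod m 8
      have h2 : 1 &&& (m >>> i) = (m >>> i) % 2 := by
        rw [Nat.and_comm]; exact Nat.and_one_is_mod _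
      rw [h1, h2, Nat.and_one_is_mod, Nat.shiftRight_eq_div_pow, Nat.shiftRight_eq_div_pow]
      interval_cases i <;> omega

theorem pv_band255_eq (v : Int) :
    ∃ m : Nat, m < 256 ∧ PySem.Int.band v 255 = Int.ofNat m := by
  cases v with
  | ofNat n =>
      refine ⟨n &&& 255, Nat.lt_succ_of_le (Nat.and_le_right), ?_⟩
      simpa using PySem.Int.band_natCast n 255
  | negSucc n =>
      refine ⟨255 - (255 &&& n), by omega, ?_⟩
      have hneg : ¬ (0 : Int) ≤ Int.negSucc n := by simp [Int.negSucc_eq]; omega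
      unfold PySem.Int.band
      rw [if_neg hneg, if_pos (by decide)]
      norm_num [Int.negSucc_eq]; norm_num [Int.toNat]

theorem pv_lookup_getD (m : Nat) (h : m < 256) : pvLOOKUP.getD m [] = pvLookupByte m := by
  simp [pvLOOKUP, List.getD, h]

-- A's inner per-value loop equals the table entry for the masked byte
theorem pv_encOne (v : Int) (acc : List Int) :
    (PySem.List.pyRange 7 (-1) (-1)).foldl (fun enc i =>
        let bit := PySem.Int.band (Int.shiftRight v i.toNat) 1
        enc ++ [if bit ≠ 0 then 0x6 else 0x4]) acc
      = acc ++ pvLOOKUP.getD (PySem.Int.band v 255).toNat [] := by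
  obtain ⟨m, hm, hv⟩ := pv_band255_eq v
  have htn : (PySem.Int.band v 255).toNat = m := by rw [hv]; rfl
  rw [htn, pv_lookup_getD m hm]
  simp only [pvRange78, pvLookupByte, List.foldl, List.map]
  simp only [List.append_assoc, List.cons_append, List.nil_append]
  rw [pv_bit_band v (Int.toNat 7) (by decide), pv_bit_band v (Int.toNat 6) (by decide),
      pv_bit_band v (Int.toNat 5) (by decide), pv_bit_band v (Int.toNat 4) (by decide),
      pv_bit_band v (Int.toNat 3) (by decide), pv_bit_band v (Int.toNat 2) (by decide),
      pv_bit_band v (Int.toNat 1) (by decide), pv_bit_band v (Int.toNat 0) (by decide), hv]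
  rfl

-- ===== VERDICT (by name: the statement is the Claim_ definition above) =====
theorem ws281x_encode_spec : Claim_equal_ws281x_encode := by
  intro pixel _
  show ws281x_encode pixel = ws281x_encode_alt pixel
  obtain ⟨r, g, b⟩ := pixel
  simp only [ws281x_encode, ws281x_encode_alt, List.foldl]
  rw [pv_encOne g, pv_encOne r, pv_encOne b]
  simp [List.append_assoc]
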